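-- pv_equiv track=rewrite | github.com/HowToSD/cremage | modules/cremage/utils/token_process_helper.py | split_token_with_embedding_tags
-- ===== SOURCE A (Python) =====
-- from typing import List, Tuple
--
-- def split_token_with_embedding_tags(s: str)-> Tuple[List[str], List[bool]]:
--     """
--     Splits a given string into tokens, identifying and tagging embedding references.
--     Each token is checked for an embedding tag, marked by angle brackets (e.g., "<embedding:file.bin>"),
--     and split accordingly. The function returns two lists: one with the split tokens and
--     another with boolean values indicating whether each corresponding token is an embedding reference.
--
--     The method assumes that tokens do not contain whitespace and treats any sequence within "<>"
--     as a potential embedding tag, provided it follows immediately after the opening bracket without whitespace.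
--
--     Args:
--         s (str): The string to be split into tokens.
--
--     Returns:
--         Tuple[List[str], List[bool]]: A tuple containing two lists:
--             - A list of string tokens split from the input.
--             - A list of boolean flags corresponding to each token, indicating whether the token is an embedding tag.
--
--     Examples:
--         >>> split_token_with_embedding_tags("abc<embedding:hello.bin>xyz")
--         (["abc", "<embedding:hello.bin>", "xyz"], [False, True, False])
--
--     Note:
--         - The function is designed to parse and identify embedding tags that are enclosed in "<>".
--         - A token is defined as a sequence of characters without any whitespace. Any whitespace should be processed as a token delimiter before calling this function.
--     """
--     retval_str = list()
--     retval_bool = list()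
--
--     current_word = ""
--     i = 0
--     word_len = len(s)
--     while True:
--         if i >= word_len:
--             if len(current_word) > 0:
--                 retval_str.append(current_word)
--                 retval_bool.append(False)
--             break
--
--         c = s[i]
--         if c != "<":
--             current_word += c
--             i += 1
--         else:
--             # scan
--             rbracket_pos = s[i:].find(">")
--             if rbracket_pos > len("embedding:"): # found
--                 embedding_tag = s[i:i+rbracket_pos+1]
--                 if len(current_word) > 0:
--                     retval_str.append(current_word)
--                     retval_bool.append(False)
--                 retval_str.append(embedding_tag)
--                 retval_bool.append(True)
--                 current_word = ""
--                 i += len(embedding_tag)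
--             else:
--                 current_word += c
--                 i += 1
--
--     return retval_str, retval_bool
-- ===== SOURCE B (Python) =====
-- import re
--
-- _TAG = re.compile(r'<[^>]{10,}>')
--
-- def split_token_with_embedding_tags(s):
--     toks, flags = [], []
--     last_end = 0
--     for m in _TAG.finditer(s):
--         if m.start() > last_end:
--             toks.append(s[last_end:m.start()])
--             flags.append(False)
--         toks.append(m.group())
--         flags.append(True)
--         last_end = m.end()
--     if last_end < len(s):
--         toks.append(s[last_end:])
--         flags.append(False)
--     return toks, flags
-- ===== Notes on version B (the rewrite author's own statement) =====
-- stated objective: idiomatic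
-- what changed: A's char-by-char while-loop with a current_word accumulator is replaced by a regex match iterator (re.finditer over r'<[^>]{10,}>') that emits the gap before each match and the match itself, tracking only last_end.
import Mathlib
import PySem

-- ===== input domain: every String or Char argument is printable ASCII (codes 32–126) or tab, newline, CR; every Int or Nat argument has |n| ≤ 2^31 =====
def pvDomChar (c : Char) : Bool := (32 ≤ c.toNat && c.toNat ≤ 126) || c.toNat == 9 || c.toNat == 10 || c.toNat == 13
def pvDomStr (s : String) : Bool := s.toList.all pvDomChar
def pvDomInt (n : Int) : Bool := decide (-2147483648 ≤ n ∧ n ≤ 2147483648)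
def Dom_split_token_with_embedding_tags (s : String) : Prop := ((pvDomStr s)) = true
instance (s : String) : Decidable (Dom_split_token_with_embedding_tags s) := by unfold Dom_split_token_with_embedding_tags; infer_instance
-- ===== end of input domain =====

-- B replaces A's char-by-char accumulator scan by a regex-style match iterator
-- (finditer over r'<[^>]{10,}>' with gap tracking); objective: idiomatic, same cost.

-- ===== PORT A =====
-- A's while-loop: index i, accumulator current_word (cur, a List Char, appended at the back),
-- result lists built by append, exactly as the Python.  s[i:].find(">") is
-- PySem.Chars.find (s.drop i) ['>']; the slice s[i:i+r+1] is (s.drop i).take (r.toNat+1).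
def pvALoop (s : List Char) (i : Nat) (cur : List Char)
    (retS : List String) (retB : List Bool) : List String × List Bool :=
  if h : s.length ≤ i then
    if cur.length > 0 then (retS ++ [String.ofList cur], retB ++ [false]) else (retS, retB)
  else
    let c := s[i]'(by omega)
    if c ≠ '<' then
      pvALoop s (i + 1) (cur ++ [c]) retS retB
    else
      let r := PySem.Chars.find (s.drop i) ['>']
      if h10 : 10 < r then
        let tag := (s.drop i).take (r.toNat + 1)
        let retS' := if cur.length > 0 then retS ++ [String.ofList cur] else retS
        let retB' := if cur.length > 0 then retB ++ [false] else retB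
        pvALoop s (i + tag.length) [] (retS' ++ [String.ofList tag]) (retB' ++ [true])
      else
        pvALoop s (i + 1) (cur ++ [c]) retS retB
termination_by s.length - i
decreasing_by
  · omega
  · simp only [List.length_take, List.length_drop]
    omega
  · omega

def split_token_with_embedding_tags (s : String) : List String × List Bool :=
  pvALoop s.toList 0 [] [] []

-- ===== PORT B =====
-- Hand port of re.finditer(r'<[^>]{10,}>', s): the pattern matches at position p iff
-- s[p] = '<' and the first '>' after p is at offset r ≥ 11 (at least 10 non-'>' chars
-- between the brackets); the match then spans s[p : p+r+1].  pvNextMatch returns the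
-- leftmost match at or after p (start, end), exactly re's leftmost scan.
def pvNextMatch (s : List Char) (p : Nat) : Option (Nat × Nat) :=
  if h : s.length ≤ p then none
  else
    let r := PySem.Chars.find (s.drop p) ['>']
    if s[p]'(by omega) = '<' ∧ 10 < r then some (p, p + r.toNat + 1)
    else pvNextMatch s (p + 1)
termination_by s.length - p

-- needed by pvBLoop's termination; cited there by name
theorem pvNextMatch_bounds (s : List Char) (p st en : Nat)
    (h : pvNextMatch s p = some (st, en)) : p ≤ st ∧ st < en ∧ st < s.length := by
  fun_induction pvNextMatch s p with
  | case1 => simp at h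
  | case2 p hp r hc => simp only [Option.some.injEq, Prod.mk.injEq] at h; omega
  | case3 p hp r hc ih => have := ih h; omega

-- B's loop over the matches: last_end tracking, gap token (if non-empty), match token.
def pvBLoop (s : List Char) (lastEnd : Nat)
    (toks : List String) (flags : List Bool) : List String × List Bool :=
  match hm : pvNextMatch s lastEnd with
  | none =>
      if lastEnd < s.length then (toks ++ [String.ofList (s.drop lastEnd)], flags ++ [false])
      else (toks, flags)
  | some (st, en) =>
      let toks' := if lastEnd < st then toks ++ [String.ofList ((s.drop lastEnd).take (st - lastEnd))] else toks
      let flags' := if lastEnd < st then flags ++ [false] else flags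
      pvBLoop s en (toks' ++ [String.ofList ((s.drop st).take (en - st))]) (flags' ++ [true])
termination_by s.length - lastEnd
decreasing_by
  have := pvNextMatch_bounds s lastEnd st en hm
  omega

def split_token_with_embedding_tags_alt (s : String) : List String × List Bool :=
  pvBLoop s.toList 0 [] []

-- ===== PRECONDITION & SPEC =====
def Spec_split_token_with_embedding_tags (s : String) (out : List String × List Bool) : Prop := out = split_token_with_embedding_tags_alt s
instance (s : String) (out : List String × List Bool) : Decidable (Spec_split_token_with_embedding_tags s out) := by unfold Spec_split_token_with_embedding_tags; infer_instance

-- ===== CLAIM (what is proved, stated in full; the proofs are below) =====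
def Claim_equal_split_token_with_embedding_tags : Prop := ∀ (s : String), Dom_split_token_with_embedding_tags s → Spec_split_token_with_embedding_tags s (split_token_with_embedding_tags s)

-- ===== LEMMAS AND PROOFS =====

-- "a regex match starts at p": s[p] = '<' and the first '>' from p is at offset > 10
def pvStart (s : List Char) (p : Nat) : Prop :=
  ∃ h : p < s.length, s[p]'h = '<' ∧ 10 < PySem.Chars.find (s.drop p) ['>']

-- facts about find on a singleton pattern, from the PySem spec lemmas
theorem pvFind_spec (l : List Char) (h : PySem.Chars.find l ['>'] ≠ -1) :
    0 ≤ PySem.Chars.find l ['>'] ∧ (PySem.Chars.find l ['>']).toNat < l.length ∧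
      l[(PySem.Chars.find l ['>']).toNat]? = some '>' := by
  have h0 : PySem.Chars.findFrom l ['>'] ((0:Nat):Int) = PySem.Chars.find l ['>'] := by
    simpa using PySem.Chars.findFrom_zero l ['>']
  have := PySem.Chars.findFrom_natCast_spec l ['>'] 0 (Nat.zero_le _) (by rw [h0]; exact h)
  rw [h0] at this
  obtain ⟨h1, h2, _⟩ := this
  refine ⟨h1, ?_, ?_⟩
  · rcases h2 with ⟨t, ht⟩
    by_contra hge
    rw [List.drop_eq_nil_of_le (by omega : l.length ≤ (PySem.Chars.find l ['>']).toNat)] at ht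
    simp at ht
  · rcases h2 with ⟨t, ht⟩
    have := congrArg (·[0]?) ht
    simpa [List.getElem?_drop] using this.symm

-- no match starts in [q, s.length) → pvNextMatch s q = none
theorem pvNextMatch_none (s : List Char) (q : Nat)
    (h : ∀ p, q ≤ p → ¬ pvStart s p) : pvNextMatch s q = none := by
  fun_induction pvNextMatch s q with
  | case1 => rfl
  | case2 p hp r hc =>
      exact absurd ⟨by omega, hc.1, hc.2⟩ (h p le_rfl)
  | case3 p hp r hc ih =>
      exact ih (fun p' hp' => h p' (by omega))

-- no match starts in [q, st), one starts at st → pvNextMatch s q finds it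
theorem pvNextMatch_some (s : List Char) (q st : Nat) (hq : q ≤ st)
    (hns : ∀ p, q ≤ p → p < st → ¬ pvStart s p) (hst : pvStart s st) :
    pvNextMatch s q = some (st, st + (PySem.Chars.find (s.drop st) ['>']).toNat + 1) := by
  obtain ⟨hlt, hc, hr⟩ := hst
  fun_induction pvNextMatch s q with
  | case1 p hp => omega
  | case2 p hp r hcond =>
      have hpst : p = st := by
        by_contra hne
        exact hns p le_rfl (by omega) ⟨by omega, hcond.1, hcond.2⟩
      subst hpst; rfl
  | case3 p hp r hcond ih =>
      have hpst : p ≠ st := by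
        intro he; subst he; exact hcond ⟨hc, hr⟩
      exact ih (by omega) (fun p' h1 h2 => hns p' (by omega) h2)

-- one-step unfoldings of pvBLoop, by the value of pvNextMatch
theorem pvBLoop_none (s : List Char) (q : Nat) (toks : List String) (flags : List Bool)
    (h : pvNextMatch s q = none) :
    pvBLoop s q toks flags =
      if q < s.length then (toks ++ [String.ofList (s.drop q)], flags ++ [false])
      else (toks, flags) := by
  rw [pvBLoop]
  split
  · rfl
  · rename_i st en heq
    rw [h] at heq; exact absurd heq (by simp)

theorem pvBLoop_some (s : List Char) (q st en : Nat) (toks : List String) (flags : List Bool)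
    (h : pvNextMatch s q = some (st, en)) :
    pvBLoop s q toks flags =
      pvBLoop s en
        ((if q < st then toks ++ [String.ofList ((s.drop q).take (st - q))] else toks)
          ++ [String.ofList ((s.drop st).take (en - st))])
        ((if q < st then flags ++ [false] else flags) ++ [true]) := by
  rw [pvBLoop]
  split
  · rename_i heq
    rw [h] at heq; exact absurd heq (by simp)
  · rename_i st' en' heq
    rw [h] at heq
    obtain ⟨h1, h2⟩ : st = st' ∧ en = en' := by simpa using heq
    subst h1; subst h2; rfl

-- the heart of the file: A's scan from i with current_word = s[j:i] equals B's loop from j,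
-- provided no match starts inside the pending gap [j, i)
theorem pvLoops_eq (s : List Char) (n i j : Nat) (retS : List String) (retB : List Bool)
    (hn : s.length - i ≤ n) (hi : i ≤ s.length) (hj : j ≤ i)
    (hns : ∀ p, j ≤ p → p < i → ¬ pvStart s p) :
    pvALoop s i ((s.drop j).take (i - j)) retS retB = pvBLoop s j retS retB := by
  induction n using Nat.strong_induction_on generalizing i j retS retB with
  | _ n ih => ?_
  have hlen : ((s.drop j).take (i - j)).length = i - j := by
    simp [List.length_take, List.length_drop]; omega
  by_cases hend : s.length ≤ i
  · -- the loop exits: flush the pending word, B finds no further match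
    have hie : i = s.length := le_antisymm hi hend
    have hnone : pvNextMatch s j = none := by
      apply pvNextMatch_none
      rintro p hp ⟨hlt, h1, h2⟩
      exact hns p hp (by omega) ⟨hlt, h1, h2⟩
    have hcur : (s.drop j).take (i - j) = s.drop j := by
      apply List.take_of_length_le; simp [List.length_drop]; omega
    rw [pvALoop, pvBLoop_none s j retS retB hnone]
    rw [dif_pos hend, hcur]
    by_cases hjl : j < s.length
    · rw [if_pos (by simp [List.length_drop]; omega : (s.drop j).length > 0), if_pos hjl]
    · rw [if_neg (by simp [List.length_drop]; omega : ¬ (s.drop j).length > 0), if_neg hjl]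
  · have hilen : i < s.length := by omega
    by_cases hsi : pvStart s i
    · -- a match starts exactly at i
      obtain ⟨hlt, hc, hr⟩ := hsi
      have hfs := pvFind_spec (s.drop i) (by omega)
      set r := PySem.Chars.find (s.drop i) ['>'] with hrdef
      have hrlen : r.toNat < s.length - i := by
        have := hfs.2.1; simpa [List.length_drop] using this
      have hsome : pvNextMatch s j = some (i, i + r.toNat + 1) := by
        exact pvNextMatch_some s j i hj hns ⟨hlt, hc, hr⟩
      have htag : ((s.drop i).take (r.toNat + 1)).length = r.toNat + 1 := by
        simp [List.length_take, List.length_drop]; omega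
      have hrec : ∀ (S : List String) (B : List Bool),
          pvALoop s (i + r.toNat + 1) [] S B = pvBLoop s (i + r.toNat + 1) S B := by
        intro S B
        have := ih (n - 1) (by omega) (i + r.toNat + 1) (i + r.toNat + 1) S B
          (by omega) (by omega) le_rfl (by intro p h1 h2; omega)
        simpa using this
      rw [pvALoop]
      simp only [dif_neg hend]
      rw [pvBLoop_some s j i (i + r.toNat + 1) retS retB hsome]
      rw [show i + r.toNat + 1 - i = r.toNat + 1 by omega]
      rw [← hrdef]
      rw [if_neg (not_not_intro hc), dif_pos hr, htag]
      by_cases hji : j < i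
      · -- pending word non-empty: both sides flush the gap, then the tag
        rw [if_pos (show ((s.drop j).take (i - j)).length > 0 by omega),
          if_pos (show ((s.drop j).take (i - j)).length > 0 by omega),
          if_pos hji, if_pos hji]
        exact hrec _ _
      · -- empty gap: only the tag is emitted
        rw [if_neg (show ¬ ((s.drop j).take (i - j)).length > 0 by omega),
          if_neg (show ¬ ((s.drop j).take (i - j)).length > 0 by omega),
          if_neg hji, if_neg hji]
        exact hrec _ _
    · -- no match starts at i: A appends s[i] to the pending word, B's scan is unchanged
      have hstep : (s.drop j).take (i + 1 - j) =
          (s.drop j).take (i - j) ++ [s[i]'hilen] := by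
        have : i + 1 - j = (i - j) + 1 := by omega
        rw [this, List.take_add_one]
        have : (s.drop j)[i - j]? = some (s[i]'hilen) := by
          rw [List.getElem?_drop]
          rw [List.getElem?_eq_getElem (by omega)]
          congr 1
          congr 1
          omega
        simp [this]
      have hrec := ih (n - 1) (by omega) (i + 1) j retS retB (by omega) (by omega)
        (by omega) (by
          intro p h1 h2
          by_cases hpi : p < i
          · exact hns p h1 hpi
          · have : p = i := by omega
            subst this; exact hsi)
      rw [hstep] at hrec
      rw [pvALoop]
      simp only [dif_neg hend]
      split_ifs with h1 h2 h3 <;>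
        first
          | exact hrec
          | exact absurd ⟨hilen, not_not.mp h1, by assumption⟩ hsi

-- ===== VERDICT (by name: the statement is the Claim_ definition above) =====
theorem split_token_with_embedding_tags_spec : Claim_equal_split_token_with_embedding_tags := by
  intro s _
  unfold Spec_split_token_with_embedding_tags split_token_with_embedding_tags split_token_with_embedding_tags_alt
  have := pvLoops_eq s.toList s.toList.length 0 0 [] [] (by omega) (by omega) (by omega)
    (by omega)
  simpa using this
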